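-- pv_equiv track=rewrite | github.com/theburhanahmed/NumerAI | backend/numerology/services/visualization_service.py | _get_center_number
-- ===== SOURCE A (Python) =====
-- from typing import Dict, List, Any, Optional
--
-- def _get_center_number(number_groups: Dict[int, List[str]]) -> Optional[int]:
--     """Get the center number (most frequent)."""
--     if not number_groups:
--         return None
--
--     max_count = max(len(types) for types in number_groups.values())
--     center_numbers = [
--         number for number, types in number_groups.items()
--         if len(types) == max_count
--     ]
--
--     return center_numbers[0] if center_numbers else None
-- ===== SOURCE B (Python) =====
-- from typing import Dict, List, Optional
--
-- def _get_center_number(number_groups: Dict[int, List[str]]) -> Optional[int]: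
--     """Get the center number (most frequent) in one pass."""
--     if not number_groups:
--         return None
--     best_number = None
--     best_count = -1
--     for number, types in number_groups.items():
--         if len(types) > best_count:
--             best_count = len(types)
--             best_number = number
--     return best_number
-- ===== Notes on version B (the rewrite author's own statement) =====
-- stated objective: simpler
-- what changed: Replaced the two-pass scheme (compute max count, then build the full list of maximal keys and take its head) with a single fold that tracks the best key and count with a strict '>' comparison, preserving first-on-tie behaviour.
import Mathlib
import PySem

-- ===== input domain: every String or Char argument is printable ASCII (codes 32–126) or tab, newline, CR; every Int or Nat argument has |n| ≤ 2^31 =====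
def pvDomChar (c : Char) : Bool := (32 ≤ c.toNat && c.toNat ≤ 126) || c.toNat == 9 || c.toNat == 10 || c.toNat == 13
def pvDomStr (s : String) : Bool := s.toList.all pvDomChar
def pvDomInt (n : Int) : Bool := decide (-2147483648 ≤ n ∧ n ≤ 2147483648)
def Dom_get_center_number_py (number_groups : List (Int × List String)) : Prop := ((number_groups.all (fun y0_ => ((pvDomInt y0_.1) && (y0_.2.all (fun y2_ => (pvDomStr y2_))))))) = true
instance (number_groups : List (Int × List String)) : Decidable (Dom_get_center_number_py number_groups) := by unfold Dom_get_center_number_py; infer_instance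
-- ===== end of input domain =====

-- B replaces A's two passes (max count, then list of maximal keys, take head) by one
-- best-so-far fold with strict '>' (keeps the first key on ties); objective: simpler.

-- ===== PORT A =====
def get_center_number_py (number_groups : List (Int × List String)) : Option Int :=
  if number_groups = [] then none
  else
    -- max(len(types) for types in number_groups.values()); none is unreachable (list nonempty)
    match PySem.List.max? (number_groups.map (fun p => (p.2.length : Int))) (fun x => x) with
    | none => none
    | some max_count =>
      let center_numbers :=
        (number_groups.filter (fun p => (p.2.length : Int) == max_count)).map Prod.fst
      center_numbers.head?   -- center_numbers[0] if center_numbers else None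

-- ===== PORT B =====
-- loop body: if len(types) > best_count: best_count, best_number := len(types), number
def pvBStep (acc : Option Int × Int) (p : Int × List String) : Option Int × Int :=
  if (p.2.length : Int) > acc.2 then (some p.1, (p.2.length : Int)) else acc

def get_center_number_py_alt (number_groups : List (Int × List String)) : Option Int :=
  if number_groups = [] then none
  else (number_groups.foldl pvBStep (none, -1)).1

-- ===== PRECONDITION & SPEC =====
def Spec_get_center_number_py (number_groups : List (Int × List String)) (out : Option Int) : Prop := out = get_center_number_py_alt number_groups
instance (number_groups : List (Int × List String)) (out : Option Int) : Decidable (Spec_get_center_number_py number_groups out) := by unfold Spec_get_center_number_py; infer_instance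

-- ===== CLAIM (what is proved, stated in full; the proofs are below) =====
def Claim_equal_get_center_number_py : Prop := ∀ (number_groups : List (Int × List String)), Dom_get_center_number_py number_groups → Spec_get_center_number_py number_groups (get_center_number_py number_groups)

-- ===== LEMMAS AND PROOFS =====

-- running maximum of the type-list lengths, seeded with c
def pvM (l : List (Int × List String)) (c : Int) : Int :=
  l.foldl (fun acc p => max acc (p.2.length : Int)) c

theorem pvM_cons (p : Int × List String) (t : List (Int × List String)) (c : Int) :
    pvM (p :: t) c = pvM t (max c (p.2.length : Int)) := rfl

theorem pvM_ge_mem (l : List (Int × List String)) (c : Int) :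
    ∀ p ∈ l, (p.2.length : Int) ≤ pvM l c :=
  (PySem.List.le_foldl_max_int l (fun p => (p.2.length : Int)) c).2

theorem pvM_eq_of_all_le (l : List (Int × List String)) (c : Int)
    (h : ∀ p ∈ l, (p.2.length : Int) ≤ c) : pvM l c = c := by
  induction l generalizing c with
  | nil => rfl
  | cons p t ih =>
    have hp : (p.2.length : Int) ≤ c := h p (by simp)
    rw [pvM_cons, max_eq_left hp]
    exact ih c (fun q hq => h q (by simp [hq]))

theorem pvM_attained (l : List (Int × List String)) (c : Int) :
    pvM l c = c ∨ ∃ p ∈ l, (p.2.length : Int) = pvM l c := by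
  induction l generalizing c with
  | nil => exact Or.inl rfl
  | cons p t ih =>
    rw [pvM_cons]
    rcases ih (max c (p.2.length : Int)) with h | ⟨q, hq, hql⟩
    · rcases max_cases c (p.2.length : Int) with ⟨he, _⟩ | ⟨he, _⟩
      · exact Or.inl (h.trans he)
      · exact Or.inr ⟨p, by simp, (h.trans he).symm⟩
    · exact Or.inr ⟨q, by simp [hq], hql⟩

-- characterisation of B's fold: result is (b, c) if nothing beats c, else the first
-- element attaining the running maximum
theorem pvFold_char (l : List (Int × List String)) (b : Option Int) (c : Int) :
    l.foldl pvBStep (b, c) =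
      if ∀ p ∈ l, (p.2.length : Int) ≤ c then (b, c)
      else ((l.filter (fun p => (p.2.length : Int) == pvM l c)).head?.elim (b, c)
              (fun q => (some q.1, pvM l c))) := by
  induction l generalizing b c with
  | nil => simp
  | cons p t ih =>
    by_cases h1 : (p.2.length : Int) > c
    · have hcond : ¬ (∀ q ∈ p :: t, (q.2.length : Int) ≤ c) := by
        intro h; exact absurd (h p (by simp)) (by omega)
      rw [if_neg hcond]
      have hstep : List.foldl pvBStep (b, c) (p :: t)
          = t.foldl pvBStep (some p.1, (p.2.length : Int)) := by
        simp [pvBStep, h1]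
      rw [hstep, ih]
      have hM : pvM (p :: t) c = pvM t (p.2.length : Int) := by
        rw [pvM_cons, max_eq_right (le_of_lt h1)]
      by_cases h2 : ∀ q ∈ t, (q.2.length : Int) ≤ (p.2.length : Int)
      · rw [if_pos h2]
        have hMt : pvM t (p.2.length : Int) = (p.2.length : Int) := pvM_eq_of_all_le _ _ h2
        have hpfil : (p :: t).filter (fun q => (q.2.length : Int) == pvM (p :: t) c)
            = p :: t.filter (fun q => (q.2.length : Int) == pvM (p :: t) c) := by
          rw [List.filter_cons_of_pos]
          simp [hM, hMt]
        rw [hpfil]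
        simp [hM, hMt]
      · rw [if_neg h2]
        push Not at h2
        obtain ⟨q, hq, hql⟩ := h2
        have hMgt : (p.2.length : Int) < pvM t (p.2.length : Int) :=
          lt_of_lt_of_le hql (pvM_ge_mem t _ q hq)
        have hpfil : (p :: t).filter (fun q => (q.2.length : Int) == pvM (p :: t) c)
            = t.filter (fun q => (q.2.length : Int) == pvM (p :: t) c) := by
          rw [List.filter_cons_of_neg]
          simp [hM]
          omega
        have hatt2 : ∃ r ∈ t, (r.2.length : Int) = pvM t (p.2.length : Int) := by
          rcases pvM_attained t (p.2.length : Int) with h | h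
          · omega
          · exact h
        obtain ⟨r, hr, hrl⟩ := hatt2
        have hmem : r ∈ t.filter (fun s => (s.2.length : Int) == pvM t (p.2.length : Int)) :=
          List.mem_filter.mpr ⟨hr, by simp [hrl]⟩
        rw [hpfil, hM]
        cases hfil : t.filter (fun s => (s.2.length : Int) == pvM t (p.2.length : Int)) with
        | nil => rw [hfil] at hmem; simp at hmem
        | cons r0 rest => simp
    · push Not at h1
      have hstep : List.foldl pvBStep (b, c) (p :: t) = t.foldl pvBStep (b, c) := by
        simp [pvBStep, not_lt.mpr h1]
      rw [hstep, ih]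
      have hM : pvM (p :: t) c = pvM t c := by
        rw [pvM_cons, max_eq_left h1]
      by_cases h2 : ∀ q ∈ t, (q.2.length : Int) ≤ c
      · have hcond : ∀ q ∈ p :: t, (q.2.length : Int) ≤ c := by
          intro q hq
          rcases List.mem_cons.mp hq with rfl | hq'
          · exact h1
          · exact h2 q hq'
        rw [if_pos h2, if_pos hcond]
      · have hcond : ¬ (∀ q ∈ p :: t, (q.2.length : Int) ≤ c) := by
          intro h; exact h2 (fun q hq => h q (by simp [hq]))
        rw [if_neg h2, if_neg hcond]
        push Not at h2
        obtain ⟨q, hq, hql⟩ := h2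
        have hMgt : c < pvM t c := lt_of_lt_of_le hql (pvM_ge_mem t _ q hq)
        have hpfil : (p :: t).filter (fun q => (q.2.length : Int) == pvM (p :: t) c)
            = t.filter (fun q => (q.2.length : Int) == pvM (p :: t) c) := by
          rw [List.filter_cons_of_neg]
          simp [hM]
          omega
        rw [hpfil, hM]

-- ===== VERDICT (by name: the statement is the Claim_ definition above) =====
theorem get_center_number_py_spec : Claim_equal_get_center_number_py := by
  intro g _hdom
  unfold Spec_get_center_number_py get_center_number_py get_center_number_py_alt
  cases g with
  | nil => simp
  | cons p t =>
    have hne : (p :: t : List (Int × List String)) ≠ [] := by simp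
    rw [if_neg hne, if_neg hne]
    -- A's max_count equals pvM (p :: t) (-1)
    have hmax : PySem.List.max? ((p :: t).map (fun q => (q.2.length : Int))) (fun x => x)
        = some (pvM (p :: t) (-1)) := by
      rw [List.map_cons, PySem.List.max?_id_cons, List.foldl_map]
      have : pvM (p :: t) (-1) = pvM t (p.2.length : Int) := by
        rw [pvM_cons, max_eq_right (by omega)]
      rw [this]
      rfl
    rw [hmax]
    -- B's fold via the characterisation
    have hcond : ¬ (∀ q ∈ p :: t, (q.2.length : Int) ≤ (-1 : Int)) := by
      intro h
      have := h p (by simp)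
      omega
    rw [pvFold_char, if_neg hcond]
    -- the filter is nonempty: the maximum is attained
    have hatt : ∃ q ∈ p :: t, (q.2.length : Int) = pvM (p :: t) (-1) := by
      rcases pvM_attained (p :: t) (-1) with h | h
      · exfalso
        have := pvM_ge_mem (p :: t) (-1) p (by simp)
        omega
      · exact h
    obtain ⟨q, hq, hql⟩ := hatt
    have hfe : ∃ q0 rest, (p :: t).filter (fun r => (r.2.length : Int) == pvM (p :: t) (-1))
        = q0 :: rest := by
      have hmem : q ∈ (p :: t).filter (fun r => (r.2.length : Int) == pvM (p :: t) (-1)) := by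
        rw [List.mem_filter]
        exact ⟨hq, by simp [hql]⟩
      cases hfil : (p :: t).filter (fun r => (r.2.length : Int) == pvM (p :: t) (-1)) with
      | nil => rw [hfil] at hmem; simp at hmem
      | cons q0 rest => exact ⟨q0, rest, rfl⟩
    obtain ⟨q0, rest, hfil⟩ := hfe
    simp [hfil]
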